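-- pv_equiv track=rewrite | github.com/jdum/odfdo | src/odfdo/utils/rfc3066.py | is_RFC3066
-- ===== SOURCE A (Python) =====
-- from string import ascii_letters, digits
--
-- def is_RFC3066(lang: str) -> bool:
--     """Checks if a string conforms to the RFC 3066 language tag format.
--
--     Valid formats are "language" or "language-country", where "language" is a
--     2 or 3-letter ASCII string, and "country" (and other subtags) are
--     alphanumeric.
--
--     Args:
--         lang: The language tag string to validate.
--
--     Returns:
--         bool: True if the tag is valid, False otherwise.
--     """
--
--     def test_part1(part1: str) -> bool:
--         if not 2 <= len(part1) <= 3: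
--             return False
--         return all(x in ascii_letters for x in part1)
--
--     def test_part2(part2: str) -> bool:
--         return all(x in ascii_letters or x in digits for x in part2)
--
--     if not lang or not isinstance(lang, str):
--         return False
--     if "-" not in lang:
--         return test_part1(lang)
--     parts = lang.split("-")
--     if len(parts) > 3:
--         return False
--     if not test_part1(parts[0]):
--         return False
--     return all(test_part2(p) for p in parts[1:])
-- ===== SOURCE B (Python) =====
-- from string import ascii_letters, digits
--
--
-- def is_RFC3066(lang: str) -> bool:
--     """Single left-to-right scan: no split, no intermediate part lists.
--
--     Tracks which subtag we are in (part) and the length of the primary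
--     subtag (seglen); checks each character as it is read.
--     """
--     if not lang or not isinstance(lang, str):
--         return False
--     part = 0
--     seglen = 0
--     for ch in lang:
--         if ch == "-":
--             if part == 0 and not 2 <= seglen <= 3:
--                 return False
--             part += 1
--             if part > 2:
--                 return False
--             seglen = 0
--         elif part == 0:
--             if ch not in ascii_letters:
--                 return False
--             seglen += 1
--         else:
--             if ch not in ascii_letters and ch not in digits:
--                 return False
--     return part > 0 or 2 <= seglen <= 3
-- ===== Notes on version B (the rewrite author's own statement) =====
-- stated objective: alternative
-- what changed: Replaces splitting the tag on hyphens into a part list followed by per-part all()-tests with a single left-to-right character scan that tracks the current subtag index and the primary subtag's length, validating each character as it is read with no intermediate lists.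
import Mathlib
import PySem

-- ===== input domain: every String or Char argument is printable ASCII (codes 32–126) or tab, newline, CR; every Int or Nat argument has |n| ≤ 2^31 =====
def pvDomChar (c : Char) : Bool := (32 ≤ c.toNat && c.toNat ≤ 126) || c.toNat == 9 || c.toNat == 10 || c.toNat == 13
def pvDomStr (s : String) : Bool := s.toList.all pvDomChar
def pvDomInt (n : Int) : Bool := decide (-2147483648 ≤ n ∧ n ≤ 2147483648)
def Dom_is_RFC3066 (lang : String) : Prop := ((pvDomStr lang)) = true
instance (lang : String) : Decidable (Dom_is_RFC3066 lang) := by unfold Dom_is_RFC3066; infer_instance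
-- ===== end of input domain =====

-- B replaces A's split-into-parts-then-test decomposition by a single left-to-right
-- character scan carrying (subtag index, primary-subtag length): alternative algorithm,
-- no intermediate part lists.

-- ===== PORT A =====
-- string.ascii_letters and string.digits
def pvAsciiLetters : List Char :=
  "abcdefghijklmnopqrstuvwxyzABCDEFGHIJKLMNOPQRSTUVWXYZ".toList
def pvDigits : List Char := "0123456789".toList

def pvTestPart1 (part1 : List Char) : Bool :=
  if ¬ (2 ≤ part1.length ∧ part1.length ≤ 3) then false
  else part1.all (fun x => pvAsciiLetters.contains x)

def pvTestPart2 (part2 : List Char) : Bool :=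
  part2.all (fun x => pvAsciiLetters.contains x || pvDigits.contains x)

def is_RFC3066 (lang : String) : Bool :=
  if lang.toList = [] then false
  else if PySem.Chars.isIn ['-'] lang.toList = false then pvTestPart1 lang.toList
  else
    let parts := PySem.Chars.splitOn lang.toList ['-']
    if parts.length > 3 then false
    else if pvTestPart1 (parts.headD []) = false then false  -- parts[0]; split never returns []
    else (parts.drop 1).all (fun p => pvTestPart2 p)

-- ===== PORT B =====
-- the for-loop of Source B: part = current subtag index, seglen = primary-subtag length
def pvScan : List Char → Nat → Nat → Bool
  | [], part, seglen => decide (part > 0) || (decide (2 ≤ seglen) && decide (seglen ≤ 3))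
  | ch :: rest, part, seglen =>
    if ch = '-' then
      if part = 0 ∧ ¬ (2 ≤ seglen ∧ seglen ≤ 3) then false
      else if part + 1 > 2 then false
      else pvScan rest (part + 1) 0
    else if part = 0 then
      if ¬ (pvAsciiLetters.contains ch = true) then false
      else pvScan rest 0 (seglen + 1)
    else
      if ¬ (pvAsciiLetters.contains ch = true) ∧ ¬ (pvDigits.contains ch = true) then false
      else pvScan rest part seglen

def is_RFC3066_alt (lang : String) : Bool :=
  if lang.toList = [] then false
  else pvScan lang.toList 0 0

-- ===== PRECONDITION & SPEC =====
def Spec_is_RFC3066 (lang : String) (out : Bool) : Prop := out = is_RFC3066_alt lang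
instance (lang : String) (out : Bool) : Decidable (Spec_is_RFC3066 lang out) := by unfold Spec_is_RFC3066; infer_instance

-- ===== CLAIM (what is proved, stated in full; the proofs are below) =====
def Claim_equal_is_RFC3066 : Prop := ∀ (lang : String), Dom_is_RFC3066 lang → Spec_is_RFC3066 lang (is_RFC3066 lang)

-- ===== LEMMAS AND PROOFS =====

-- reference splitter: Python's s.split("-") written with an explicit current-part accumulator
def pvSplitAux (pre : List Char) : List Char → List (List Char)
  | [] => [pre]
  | c :: rest => if c = '-' then pre :: pvSplitAux [] rest else pvSplitAux (pre ++ [c]) rest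

theorem pv_go_eq : ∀ (fuel : Nat) (l cur : List Char) (acc : List (List Char)),
    l.length ≤ fuel →
    PySem.Chars.splitOn.go ['-'] fuel l cur acc = acc.reverse ++ pvSplitAux cur.reverse l := by
  intro fuel
  induction fuel with
  | zero =>
    intro l cur acc h
    have : l = [] := List.eq_nil_of_length_eq_zero (Nat.le_zero.mp h)
    subst this
    simp [PySem.Chars.splitOn.go, pvSplitAux]
  | succ n ih =>
    intro l cur acc h
    cases l with
    | nil => simp [PySem.Chars.splitOn.go, pvSplitAux]
    | cons c rest =>
      by_cases hc : c = '-'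
      · subst hc
        rw [PySem.Chars.splitOn.go]
        simp only [List.isPrefixOf, List.length_cons] at *
        rw [if_pos (by simp [List.isPrefixOf])]
        simp only [List.length_nil, List.length_cons, List.drop_succ_cons, List.drop_zero]
        rw [ih rest [] (cur.reverse :: acc) (by simpa using Nat.le_of_succ_le_succ h)]
        simp [pvSplitAux]
      · rw [PySem.Chars.splitOn.go]
        rw [if_neg (by simp [List.isPrefixOf, hc]; intro h'; exact hc h'.symm)]
        rw [ih rest (c :: cur) acc (by simpa using Nat.le_of_succ_le_succ h)]
        simp [pvSplitAux, hc]

theorem pv_splitOn_eq (l : List Char) :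
    PySem.Chars.splitOn l ['-'] = pvSplitAux [] l := by
  rw [PySem.Chars.splitOn]
  rw [pv_go_eq (l.length + 1) l [] [] (Nat.le_succ _)]
  simp

theorem pv_nodash (l : List Char) (h : '-' ∉ l) : ∀ pre, pvSplitAux pre l = [pre ++ l] := by
  induction l with
  | nil => intro pre; simp [pvSplitAux]
  | cons c rest ih =>
    intro pre
    have hc : c ≠ '-' := fun hx => h (hx ▸ List.mem_cons_self)
    have hr : '-' ∉ rest := fun hx => h (List.mem_cons_of_mem _ hx)
    simp [pvSplitAux, hc, ih hr]

theorem pv_head (cs : List Char) : ∀ pre, ∃ t, (pvSplitAux pre cs).headD [] = pre ++ t := by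
  induction cs with
  | nil => intro pre; exact ⟨[], by simp [pvSplitAux]⟩
  | cons c rest ih =>
    intro pre
    by_cases hc : c = '-'
    · exact ⟨[], by simp [pvSplitAux, hc]⟩
    · obtain ⟨t, ht⟩ := ih (pre ++ [c])
      refine ⟨c :: t, ?_⟩
      show (pvSplitAux pre (c :: rest)).headD [] = pre ++ c :: t
      rw [pvSplitAux, if_neg hc, ht]
      simp

def pvCheckParts (P : List (List Char)) : Bool :=
  if P.length > 3 then false
  else if pvTestPart1 (P.headD []) = false then false
  else (P.drop 1).all (fun p => pvTestPart2 p)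

theorem pv_bad_alnum (cs : List Char) : ∀ pre c, c ∈ pre →
    (pvAsciiLetters.contains c || pvDigits.contains c) = false →
    (pvSplitAux pre cs).all (fun p => pvTestPart2 p) = false := by
  induction cs with
  | nil =>
    intro pre c hm hbad
    simp only [pvSplitAux, List.all_cons, List.all_nil, Bool.and_true]
    simp only [pvTestPart2, List.all_eq_false]
    exact ⟨c, hm, by simpa using hbad⟩
  | cons d rest ih =>
    intro pre c hm hbad
    by_cases hd : d = '-'
    · simp only [pvSplitAux, if_pos hd, List.all_cons]
      have : pvTestPart2 pre = false := by
        simp only [pvTestPart2, List.all_eq_false]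
        exact ⟨c, hm, by simpa using hbad⟩
      simp [this]
    · simp only [pvSplitAux, if_neg hd]
      exact ih (pre ++ [d]) c (List.mem_append_left _ hm) hbad

theorem pv_bad_alpha (t pre : List Char) (c : Char) (hm : c ∈ pre)
    (hbad : pvAsciiLetters.contains c = false) : pvTestPart1 (pre ++ t) = false := by
  rw [pvTestPart1]
  split_ifs with h
  all_goals first
    | rfl
    | (simp only [List.all_eq_false]
       exact ⟨c, List.mem_append_left _ hm, by simpa using hbad⟩)

theorem pv_len_pos : ∀ (cs pre : List Char), 1 ≤ (pvSplitAux pre cs).length := by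
  intro cs
  induction cs with
  | nil => intro pre; simp [pvSplitAux]
  | cons c rest ih =>
    intro pre
    by_cases hc : c = '-'
    · simp [pvSplitAux, hc]
    · simpa [pvSplitAux, hc] using ih (pre ++ [c])

theorem pv_scan_tail (cs : List Char) : ∀ (pre : List Char) (p m : Nat),
    (p = 1 ∨ p = 2) → pre.all (fun x => pvAsciiLetters.contains x || pvDigits.contains x) = true →
    pvScan cs p m
      = (decide ((pvSplitAux pre cs).length ≤ 3 - p)
          && (pvSplitAux pre cs).all (fun q => pvTestPart2 q)) := by
  induction cs with
  | nil =>
    intro pre p m hp hpre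
    have h2 : pvTestPart2 pre = true := hpre
    rcases hp with h | h <;> subst h <;> simp [pvScan, pvSplitAux, h2]
  | cons d rest ih =>
    intro pre p p0 hp hpre
    by_cases hd : d = '-'
    · subst hd
      rcases hp with h | h
      · subst h
        rw [pvScan]
        rw [if_pos rfl, if_neg (by simp), if_neg (by norm_num)]
        rw [ih [] 2 0 (Or.inr rfl) (by simp)]
        have hsp : pvSplitAux pre ('-' :: rest) = pre :: pvSplitAux [] rest := by
          simp [pvSplitAux]
        rw [hsp]
        simp only [List.length_cons, List.all_cons, hpre, Bool.true_and]
        congr 1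
        · exact decide_eq_decide.mpr (by omega)
        · rw [show pvTestPart2 pre = true from hpre, Bool.true_and]
      · subst h
        rw [pvScan]
        rw [if_pos rfl, if_neg (by simp), if_pos (by norm_num)]
        have hlen := pv_len_pos rest []
        have hsp : pvSplitAux pre ('-' :: rest) = pre :: pvSplitAux [] rest := by
          simp [pvSplitAux]
        rw [hsp]
        simp only [List.length_cons]
        have hno : ¬ ((pvSplitAux [] rest).length + 1 ≤ 3 - 2) := by omega
        simp [hno]
    · rw [pvScan, if_neg hd]
      have hpne : ¬ (p = 0) := by rcases hp with h | h <;> omega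
      rw [if_neg hpne]
      by_cases hok : pvAsciiLetters.contains d = true ∨ pvDigits.contains d = true
      · rw [if_neg (by tauto)]
        rw [ih (pre ++ [d]) p p0 hp (by
          simp only [List.all_append, hpre, Bool.true_and, List.all_cons, List.all_nil,
            Bool.and_true]
          rcases hok with h | h <;> rw [h] <;> simp)]
        simp [pvSplitAux, hd]
      · push_neg at hok
        rw [if_pos hok]
        simp only [pvSplitAux, if_neg hd]
        rw [pv_bad_alnum rest (pre ++ [d]) d (List.mem_append_right _ (by simp))
          (by simp [Bool.or_eq_false_iff]; exact ⟨by simpa using hok.1, by simpa using hok.2⟩)]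
        simp

theorem pv_scan_head (cs : List Char) : ∀ (pre : List Char),
    pre.all (fun x => pvAsciiLetters.contains x) = true →
    pvScan cs 0 pre.length = pvCheckParts (pvSplitAux pre cs) := by
  induction cs with
  | nil =>
    intro pre hpre
    by_cases hb : 2 ≤ pre.length ∧ pre.length ≤ 3
    · have h1 : pvTestPart1 pre = true := by
        rw [pvTestPart1, if_neg (by tauto)]; exact hpre
      simp [pvScan, pvSplitAux, pvCheckParts, h1, hb.1, hb.2]
    · have h1 : pvTestPart1 pre = false := by
        rw [pvTestPart1, if_pos hb]
      have h2 : (decide (2 ≤ pre.length) && decide (pre.length ≤ 3)) = false := by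
        rw [Bool.and_eq_false_iff]
        by_cases h : 2 ≤ pre.length
        · exact Or.inr (by simp; omega)
        · exact Or.inl (by simp; omega)
      simp [pvScan, pvSplitAux, pvCheckParts, h1, h2]
  | cons d rest ih =>
    intro pre hpre
    by_cases hd : d = '-'
    · subst hd
      rw [pvScan, if_pos rfl]
      have hsp : pvSplitAux pre ('-' :: rest) = pre :: pvSplitAux [] rest := by
        simp [pvSplitAux]
      by_cases hb : 2 ≤ pre.length ∧ pre.length ≤ 3
      · rw [if_neg (by tauto)]
        rw [if_neg (by norm_num)]
        rw [pv_scan_tail rest [] 1 0 (Or.inl rfl) (by simp)]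
        have h1 : pvTestPart1 pre = true := by
          rw [pvTestPart1, if_neg (by tauto)]; exact hpre
        rw [hsp, pvCheckParts]
        simp only [List.length_cons, h1, Bool.false_eq_true, if_false, List.drop_one,
          List.tail_cons]
        by_cases hm : (pvSplitAux [] rest).length ≤ 2
        · rw [if_neg (by omega)]
          simp [hm, h1]
        · rw [if_pos (by omega)]
          simp [hm, h1]
      · rw [if_pos ⟨rfl, hb⟩]
        have h1 : pvTestPart1 pre = false := by rw [pvTestPart1, if_pos hb]
        rw [hsp, pvCheckParts]
        simp [h1]
    · rw [pvScan, if_neg hd, if_pos rfl]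
      by_cases hok : pvAsciiLetters.contains d = true
      · rw [if_neg (not_not_intro hok)]
        rw [show pre.length + 1 = (pre ++ [d]).length by simp]
        rw [ih (pre ++ [d]) (by
          simp only [List.all_append, hpre, Bool.true_and, List.all_cons, List.all_nil,
            Bool.and_true]
          exact hok)]
        simp [pvSplitAux, hd]
      · rw [if_pos hok]
        obtain ⟨t, ht⟩ := pv_head rest (pre ++ [d])
        have h1 : pvTestPart1 ((pvSplitAux (pre ++ [d]) rest).headD []) = false := by
          rw [ht]
          exact pv_bad_alpha t (pre ++ [d]) d (List.mem_append_right _ (by simp))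
            (eq_false_of_ne_true hok)
        rw [show pvSplitAux pre (d :: rest) = pvSplitAux (pre ++ [d]) rest from by
          simp [pvSplitAux, hd]]
        rw [pvCheckParts, h1]
        simp

theorem pv_main (lang : String) : is_RFC3066 lang = is_RFC3066_alt lang := by
  rw [is_RFC3066, is_RFC3066_alt]
  by_cases hnil : lang.toList = []
  · simp [hnil]
  · rw [if_neg hnil, if_neg hnil]
    have hB : pvScan lang.toList 0 0 = pvCheckParts (pvSplitAux [] lang.toList) :=
      pv_scan_head lang.toList [] (by simp)
    rw [hB]
    by_cases hdash : PySem.Chars.isIn ['-'] lang.toList = false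
    · rw [if_pos hdash]
      have hmem : '-' ∉ lang.toList := by
        intro hm
        have hinf : ['-'] <:+: lang.toList := by
          obtain ⟨s, t, hst⟩ := List.mem_iff_append.mp hm
          exact ⟨s, t, by simp [hst]⟩
        exact (PySem.Chars.isIn_eq_false_iff _ _).mp hdash hinf
      rw [pv_nodash _ hmem []]
      cases h1 : pvTestPart1 lang.toList <;>
        simp [pvCheckParts, h1]
    · rw [if_neg hdash, pv_splitOn_eq]
      rfl

-- ===== VERDICT (by name: the statement is the Claim_ definition above) =====
theorem is_RFC3066_spec : Claim_equal_is_RFC3066 := by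
  intro lang _
  unfold Spec_is_RFC3066
  exact pv_main lang
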